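-- pv_equiv track=rewrite | github.com/rud72k/PAN2020 | carisegmen.py | carisegmen
-- ===== SOURCE A (Python) =====
-- def carisegmen(xData,x):
--     '''mencari interval pada xData dimana x berada. Nilai yang dihasilkan adalah batas kiri interval'''
--     kiri = 0
--     kanan = len(xData)- 1
--     while True:
--         if (kanan-kiri) <= 1:
--             return kiri
--         i =int((kiri + kanan)/2)
--         if x < xData[i]: kanan = i
--         else: kiri = i
-- ===== SOURCE B (Python) =====
-- def carisegmen(xData, x):
--     '''mencari interval pada xData dimana x berada. Nilai yang dihasilkan adalah batas kiri interval'''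
--     def go(lo, w):
--         if w <= 1:
--             return lo
--         h = w // 2
--         i = lo + h
--         if x < xData[i]:
--             return go(lo, h)
--         return go(i, w - h)
--     return go(0, len(xData) - 1)
-- ===== Notes on version B (the rewrite author's own statement) =====
-- stated objective: alternative
-- what changed: A's while-True loop mutating (kiri, kanan) is re-decomposed as a recursive helper over (left bound, segment width), replacing the midpoint int((kiri+kanan)/2) by lo + w//2; same comparison sequence and result on any list, sorted or not.
import Mathlib
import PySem

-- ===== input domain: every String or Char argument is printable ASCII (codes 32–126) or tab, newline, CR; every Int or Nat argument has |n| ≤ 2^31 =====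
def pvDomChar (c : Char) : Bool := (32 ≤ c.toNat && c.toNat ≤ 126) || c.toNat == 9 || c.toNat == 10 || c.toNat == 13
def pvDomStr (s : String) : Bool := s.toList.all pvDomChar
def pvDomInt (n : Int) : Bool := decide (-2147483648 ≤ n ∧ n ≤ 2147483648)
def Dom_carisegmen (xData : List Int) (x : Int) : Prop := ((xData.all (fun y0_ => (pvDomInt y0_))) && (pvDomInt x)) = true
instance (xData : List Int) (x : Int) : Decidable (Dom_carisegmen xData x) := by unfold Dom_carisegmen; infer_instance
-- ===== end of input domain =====

-- B reformulates A's iterative binary search as a recursion over (left bound, segment width); same comparisons, same result.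

-- ===== PORT A =====
-- the while-True loop of A, recursing on the same state (kiri, kanan).
-- i = int((kiri+kanan)/2): every state the loop reaches has 0 ≤ kiri ≤ kanan, where
-- Python's truncating int(/) coincides with floor division, ported exactly by floordiv.
def carisegmenLoop (xData : List Int) (x : Int) (kiri kanan : Int) : Int :=
  if kanan - kiri ≤ 1 then kiri
  else
    let i := PySem.Int.floordiv (kiri + kanan) 2
    if x < (PySem.List.pyGet? xData i).getD 0 then carisegmenLoop xData x kiri i
    else carisegmenLoop xData x i kanan
termination_by (kanan - kiri).toNat
decreasing_by
  · have := PySem.Int.floordiv_two_mid_bounds (lo := kiri) (hi := kanan) (by omega)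
    have h2 : PySem.Int.floordiv (kiri + kanan) 2 * 2 ≤ kiri + kanan :=
      (PySem.Int.le_floordiv_iff_mul_le (by omega)).mp le_rfl
    omega
  · have h2 : kiri + kanan < (PySem.Int.floordiv (kiri + kanan) 2 + 1) * 2 :=
      (PySem.Int.floordiv_lt_iff_lt_mul (by omega)).mp (by omega)
    have := PySem.Int.floordiv_two_mid_bounds (lo := kiri) (hi := kanan) (by omega)
    omega

def carisegmen (xData : List Int) (x : Int) : Int :=
  carisegmenLoop xData x 0 ((xData.length : Int) - 1)

-- ===== PORT B =====
-- the inner recursion go(lo, w) of Source B: recursion on the segment width w.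
def carisegmenGo (xData : List Int) (x : Int) (lo w : Int) : Int :=
  if w ≤ 1 then lo
  else
    let h := PySem.Int.floordiv w 2
    let i := lo + h
    if x < (PySem.List.pyGet? xData i).getD 0 then carisegmenGo xData x lo h
    else carisegmenGo xData x i (w - h)
termination_by w.toNat
decreasing_by
  · have h2 : PySem.Int.floordiv w 2 * 2 ≤ w :=
      (PySem.Int.le_floordiv_iff_mul_le (by omega)).mp le_rfl
    have h3 : w < (PySem.Int.floordiv w 2 + 1) * 2 :=
      (PySem.Int.floordiv_lt_iff_lt_mul (by omega)).mp (by omega)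
    omega
  · have h2 : PySem.Int.floordiv w 2 * 2 ≤ w :=
      (PySem.Int.le_floordiv_iff_mul_le (by omega)).mp le_rfl
    have h3 : w < (PySem.Int.floordiv w 2 + 1) * 2 :=
      (PySem.Int.floordiv_lt_iff_lt_mul (by omega)).mp (by omega)
    omega

def carisegmen_alt (xData : List Int) (x : Int) : Int :=
  carisegmenGo xData x 0 ((xData.length : Int) - 1)

-- ===== PRECONDITION & SPEC =====
def Spec_carisegmen (xData : List Int) (x : Int) (out : Int) : Prop := out = carisegmen_alt xData x
instance (xData : List Int) (x : Int) (out : Int) : Decidable (Spec_carisegmen xData x out) := by unfold Spec_carisegmen; infer_instance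

-- ===== CLAIM (what is proved, stated in full; the proofs are below) =====
def Claim_equal_carisegmen : Prop := ∀ (xData : List Int) (x : Int), Dom_carisegmen xData x → Spec_carisegmen xData x (carisegmen xData x)

-- ===== LEMMAS AND PROOFS =====

-- the loop on (kiri, kanan) computes B's recursion on (kiri, kanan - kiri)
theorem carisegmenLoop_eq_go (xData : List Int) (x : Int) :
    ∀ (n : Nat) (kiri kanan : Int), (kanan - kiri).toNat ≤ n →
      carisegmenLoop xData x kiri kanan = carisegmenGo xData x kiri (kanan - kiri) := by
  intro n
  induction n with
  | zero =>
    intro kiri kanan hn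
    rw [carisegmenLoop, carisegmenGo]
    simp only [if_pos (show kanan - kiri ≤ 1 by omega)]
  | succ n ih =>
    intro kiri kanan hn
    rw [carisegmenLoop, carisegmenGo]
    by_cases hle : kanan - kiri ≤ 1
    · simp only [if_pos hle]
    · simp only [if_neg hle]
      -- midpoint identity: (kiri+kanan) // 2 = kiri + (kanan-kiri) // 2
      have hmid : PySem.Int.floordiv (kiri + kanan) 2 = kiri + PySem.Int.floordiv (kanan - kiri) 2 := by
        rw [PySem.Int.floordiv_eq_iff_of_pos (by omega)]
        have h2 : PySem.Int.floordiv (kanan - kiri) 2 * 2 ≤ kanan - kiri :=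
          (PySem.Int.le_floordiv_iff_mul_le (by omega)).mp le_rfl
        have h3 : kanan - kiri < (PySem.Int.floordiv (kanan - kiri) 2 + 1) * 2 :=
          (PySem.Int.floordiv_lt_iff_lt_mul (by omega)).mp (by omega)
        constructor <;> nlinarith
      have hb1 : PySem.Int.floordiv (kanan - kiri) 2 * 2 ≤ kanan - kiri :=
        (PySem.Int.le_floordiv_iff_mul_le (by omega)).mp le_rfl
      have hb2 : kanan - kiri < (PySem.Int.floordiv (kanan - kiri) 2 + 1) * 2 :=
        (PySem.Int.floordiv_lt_iff_lt_mul (by omega)).mp (by omega)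
      rw [hmid]
      by_cases hx : x < (PySem.List.pyGet? xData (kiri + PySem.Int.floordiv (kanan - kiri) 2)).getD 0
      · simp only [if_pos hx]
        have := ih kiri (kiri + PySem.Int.floordiv (kanan - kiri) 2) (by omega)
        simpa using this
      · simp only [if_neg hx]
        have := ih (kiri + PySem.Int.floordiv (kanan - kiri) 2) kanan (by omega)
        have harg : kanan - (kiri + PySem.Int.floordiv (kanan - kiri) 2)
            = kanan - kiri - PySem.Int.floordiv (kanan - kiri) 2 := by ring
        rw [harg] at this
        exact this

-- ===== VERDICT (by name: the statement is the Claim_ definition above) =====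
theorem carisegmen_spec : Claim_equal_carisegmen := by
  intro xData x _
  unfold Spec_carisegmen carisegmen carisegmen_alt
  have := carisegmenLoop_eq_go xData x (((xData.length : Int) - 1 - 0).toNat) 0 ((xData.length : Int) - 1) le_rfl
  simpa using this
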